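-- pv_equiv track=rewrite | github.com/cauchy221/Alignment-Whack-a-Mole-Code | analysis/model_similarity.py | _trim_instruction
-- ===== SOURCE A (Python) =====
-- from typing import Any, Dict, List, Optional, Set, Tuple
--
-- def _kset(words: List[str], k: int) -> Set[tuple]:
--     if k <= 0:
--         return set()
--     return {tuple(words[i : i + k]) for i in range(len(words) - k + 1)}
--
-- def _merge_intervals(intervals: List[Tuple[int, int]]) -> List[Tuple[int, int]]:
--     if not intervals:
--         return []
--     intervals = sorted(intervals)
--     merged = [intervals[0]]
--     for s, e in intervals[1:]:
--         if s <= merged[-1][1]: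
--             merged[-1] = (merged[-1][0], max(merged[-1][1], e))
--         else:
--             merged.append((s, e))
--     return merged
--
-- def _subtract(base: Tuple[int, int], removes: List[Tuple[int, int]]) -> List[Tuple[int, int]]:
--     s, e = base
--     clamped = [(max(s, a), min(e, b)) for a, b in removes if not (b <= s or a >= e)]
--     rm = _merge_intervals([r for r in clamped if r[0] < r[1]])
--     if not rm:
--         return [base]
--     out, cur = [], s
--     for a, b in rm:
--         if cur < a:
--             out.append((cur, a))
--         cur = max(cur, b)
--     if cur < e:
--         out.append((cur, e))
--     return out
--
-- def _trim_instruction(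
--     gold_words: List[str], instr_words: List[str],
--     intervals: List[Tuple[int, int]], k: int, trim_k: int,
-- ) -> List[Tuple[int, int]]:
--     trimmed: List[Tuple[int, int]] = []
--     for raw in intervals:
--         s, e = raw
--         span_len = e - s
--         if trim_k <= 0 or span_len < trim_k:
--             if span_len >= k:
--                 trimmed.append(raw)
--             continue
--         instr_k = _kset(instr_words, trim_k)
--         removes = []
--         for i in range(span_len - trim_k + 1):
--             kg = tuple(gold_words[s + i : s + i + trim_k])
--             if kg in instr_k:
--                 removes.append((s + i, s + i + trim_k))
--         removes = _merge_intervals(removes)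
--         for start, end in _subtract(raw, removes):
--             if end - start >= k:
--                 trimmed.append((start, end))
--     return _merge_intervals(trimmed)
-- ===== SOURCE B (Python) =====
-- from typing import List, Set, Tuple
--
-- def _kset(words: List[str], k: int) -> Set[tuple]:
--     if k <= 0:
--         return set()
--     return {tuple(words[i : i + k]) for i in range(len(words) - k + 1)}
--
-- def _merge_intervals(intervals: List[Tuple[int, int]]) -> List[Tuple[int, int]]:
--     if not intervals:
--         return []
--     intervals = sorted(intervals)
--     merged = [intervals[0]]
--     for s, e in intervals[1:]:
--         if s <= merged[-1][1]:
--             merged[-1] = (merged[-1][0], max(merged[-1][1], e))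
--         else:
--             merged.append((s, e))
--     return merged
--
-- def _trim_instruction(
--     gold_words: List[str], instr_words: List[str],
--     intervals: List[Tuple[int, int]], k: int, trim_k: int,
-- ) -> List[Tuple[int, int]]:
--     # A single left-to-right sweep per interval instead of building, merging and
--     # subtracting removal intervals: `cur` is the left edge of the current kept run;
--     # each k-gram hit closes the run (emitting it if long enough) and pushes `cur`
--     # past the hit.
--     trimmed: List[Tuple[int, int]] = []
--     for s, e in intervals:
--         span_len = e - s
--         if trim_k <= 0 or span_len < trim_k:
--             if span_len >= k:
--                 trimmed.append((s, e))
--             continue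
--         instr_k = _kset(instr_words, trim_k)
--         cur = s
--         for i in range(span_len - trim_k + 1):
--             if tuple(gold_words[s + i : s + i + trim_k]) in instr_k:
--                 if cur < s + i and s + i - cur >= k:
--                     trimmed.append((cur, s + i))
--                 cur = max(cur, s + i + trim_k)
--         if cur < e and e - cur >= k:
--             trimmed.append((cur, e))
--     return _merge_intervals(trimmed)
-- ===== Notes on version B (the rewrite author's own statement) =====
-- stated objective: alternative
-- what changed: For each trimmable interval B replaces A's pipeline (build a removes list, merge it, clamp, merge again, subtract it from the base) by a single left-to-right sweep that tracks the left edge of the current kept run and emits length-filtered kept gaps directly as it scans the k-gram positions.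
import Mathlib
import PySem

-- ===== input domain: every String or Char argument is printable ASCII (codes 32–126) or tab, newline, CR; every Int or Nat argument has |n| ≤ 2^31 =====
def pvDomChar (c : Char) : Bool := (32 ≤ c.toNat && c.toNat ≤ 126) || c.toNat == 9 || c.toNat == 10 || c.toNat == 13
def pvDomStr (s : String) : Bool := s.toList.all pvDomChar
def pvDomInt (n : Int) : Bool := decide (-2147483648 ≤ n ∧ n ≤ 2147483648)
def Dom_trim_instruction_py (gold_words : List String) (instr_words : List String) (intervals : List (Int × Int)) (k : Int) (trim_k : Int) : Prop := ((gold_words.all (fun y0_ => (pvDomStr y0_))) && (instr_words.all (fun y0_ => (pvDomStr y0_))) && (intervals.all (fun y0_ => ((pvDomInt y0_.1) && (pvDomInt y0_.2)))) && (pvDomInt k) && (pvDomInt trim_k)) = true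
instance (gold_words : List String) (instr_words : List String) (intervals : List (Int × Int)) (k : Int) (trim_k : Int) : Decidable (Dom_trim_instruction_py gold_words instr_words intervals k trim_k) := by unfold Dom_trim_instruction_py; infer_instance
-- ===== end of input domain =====

-- B replaces A's per-interval build-removes/merge/clamp/merge-again/subtract pipeline by one
-- left-to-right sweep per interval that emits the kept gaps directly (objective: alternative).

-- ===== PORT A =====
-- shared module helper: _kset(words, k)
def pvKset (words : List String) (k : Int) : PySem.Set (List String) :=
  if k ≤ 0 then PySem.Set.empty
  else PySem.Set.ofList ((PySem.List.pyRange 0 ((words.length : Int) - k + 1) 1).map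
    (fun i => PySem.List.slice words (some i) (some (i + k))))

-- merged[-1] is carried as `cur`; entries pushed in front of the recursion are final
def pvMergeLoop (cur : Int × Int) : List (Int × Int) → List (Int × Int)
  | [] => [cur]
  | (s, e) :: rest =>
      if s ≤ cur.2 then pvMergeLoop (cur.1, max cur.2 e) rest
      else cur :: pvMergeLoop (s, e) rest

-- shared module helper: _merge_intervals(intervals)
def pvMergeIntervals (intervals : List (Int × Int)) : List (Int × Int) :=
  match PySem.List.sorted2 intervals Prod.fst Prod.snd with
  | [] => []
  | x :: rest => pvMergeLoop x rest

-- helper: _subtract(base, removes)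
def pvSubtract (base : Int × Int) (removes : List (Int × Int)) : List (Int × Int) :=
  let s := base.1
  let e := base.2
  let clamped := (removes.filter (fun r => !(decide (r.2 ≤ s) || decide (r.1 ≥ e)))).map
    (fun r => (max s r.1, min e r.2))
  let rm := pvMergeIntervals (clamped.filter (fun r => decide (r.1 < r.2)))
  if rm = [] then [base]
  else
    let oc := rm.foldl (fun (st : List (Int × Int) × Int) r =>
      (if st.2 < r.1 then st.1 ++ [(st.2, r.1)] else st.1, max st.2 r.2)) ([], s)
    if oc.2 < e then oc.1 ++ [(oc.2, e)] else oc.1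

def trim_instruction_py (gold_words : List String) (instr_words : List String) (intervals : List (Int × Int)) (k : Int) (trim_k : Int) : List (Int × Int) :=
  let trimmed := intervals.foldl (fun trimmed raw =>
    let s := raw.1
    let e := raw.2
    let span_len := e - s
    if trim_k ≤ 0 ∨ span_len < trim_k then
      if span_len ≥ k then trimmed ++ [raw] else trimmed
    else
      let instr_k := pvKset instr_words trim_k
      let removes := (PySem.List.pyRange 0 (span_len - trim_k + 1) 1).foldl
        (fun acc i =>
          if PySem.Set.contains instr_k (PySem.List.slice gold_words (some (s + i)) (some (s + i + trim_k)))
          then acc ++ [(s + i, s + i + trim_k)] else acc) []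
      let removes2 := pvMergeIntervals removes
      (pvSubtract raw removes2).foldl
        (fun tr r => if r.2 - r.1 ≥ k then tr ++ [r] else tr) trimmed) []
  pvMergeIntervals trimmed

-- ===== PORT B =====
def trim_instruction_py_alt (gold_words : List String) (instr_words : List String) (intervals : List (Int × Int)) (k : Int) (trim_k : Int) : List (Int × Int) :=
  let trimmed := intervals.foldl (fun trimmed raw =>
    let s := raw.1
    let e := raw.2
    let span_len := e - s
    if trim_k ≤ 0 ∨ span_len < trim_k then
      if span_len ≥ k then trimmed ++ [raw] else trimmed
    else
      let instr_k := pvKset instr_words trim_k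
      let oc := (PySem.List.pyRange 0 (span_len - trim_k + 1) 1).foldl
        (fun (st : List (Int × Int) × Int) i =>
          if PySem.Set.contains instr_k (PySem.List.slice gold_words (some (s + i)) (some (s + i + trim_k)))
          then (if st.2 < s + i ∧ s + i - st.2 ≥ k then st.1 ++ [(st.2, s + i)] else st.1,
                max st.2 (s + i + trim_k))
          else st) (trimmed, s)
      if oc.2 < e ∧ e - oc.2 ≥ k then oc.1 ++ [(oc.2, e)] else oc.1) []
  pvMergeIntervals trimmed

-- ===== PRECONDITION & SPEC =====
def Spec_trim_instruction_py (gold_words : List String) (instr_words : List String) (intervals : List (Int × Int)) (k : Int) (trim_k : Int) (out : List (Int × Int)) : Prop := out = trim_instruction_py_alt gold_words instr_words intervals k trim_k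
instance (gold_words : List String) (instr_words : List String) (intervals : List (Int × Int)) (k : Int) (trim_k : Int) (out : List (Int × Int)) : Decidable (Spec_trim_instruction_py gold_words instr_words intervals k trim_k out) := by unfold Spec_trim_instruction_py; infer_instance

-- ===== CLAIM (what is proved, stated in full; the proofs are below) =====
def Claim_equal_trim_instruction_py : Prop := ∀ (gold_words : List String) (instr_words : List String) (intervals : List (Int × Int)) (k : Int) (trim_k : Int), Dom_trim_instruction_py gold_words instr_words intervals k trim_k → Spec_trim_instruction_py gold_words instr_words intervals k trim_k (trim_instruction_py gold_words instr_words intervals k trim_k)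

-- ===== LEMMAS AND PROOFS =====

-- A's subtract-loop step ("gap emission") and B's fused sweep step (gap emission + length filter)
def pvSubStep (st : List (Int × Int) × Int) (r : Int × Int) : List (Int × Int) × Int :=
  (if st.2 < r.1 then st.1 ++ [(st.2, r.1)] else st.1, max st.2 r.2)

def pvSwStep (k : Int) (st : List (Int × Int) × Int) (r : Int × Int) : List (Int × Int) × Int :=
  (if st.2 < r.1 ∧ r.1 - st.2 ≥ k then st.1 ++ [(st.2, r.1)] else st.1, max st.2 r.2)

theorem pv_sorted2_aux (xs : List (Int × Int)) :
    ∀ (acc : List (Int × Int)),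
    (∀ y ∈ acc, ∀ x ∈ xs, y.1 < x.1) →
    xs.Pairwise (fun p q => p.1 < q.1) →
    xs.foldl (fun acc x => PySem.List.insertBy
      (fun a b => decide (Prod.fst a < Prod.fst b) ||
        (!decide (Prod.fst b < Prod.fst a) && decide (Prod.snd a < Prod.snd b))) x acc) acc
      = acc ++ xs := by
  induction xs with
  | nil => intro acc _ _; simp
  | cons x xs ih =>
    intro acc hlt hpw
    have hins : PySem.List.insertBy
        (fun a b => decide (Prod.fst a < Prod.fst b) ||
          (!decide (Prod.fst b < Prod.fst a) && decide (Prod.snd a < Prod.snd b))) x acc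
        = acc ++ [x] := by
      apply PySem.List.insertBy_of_forall_not_before
      intro y hy
      have := hlt y hy x (by simp)
      simp only [Bool.or_eq_false_iff, decide_eq_false_iff_not, Bool.and_eq_false_iff,
        Bool.not_eq_false', decide_eq_true_eq]
      constructor
      · omega
      · left; omega
    rw [List.foldl_cons, hins, ih]
    · simp
    · intro y hy z hz
      rcases List.mem_append.mp hy with h | h
      · exact hlt y h z (by simp [hz])
      · simp at h; subst h
        exact (List.pairwise_cons.mp hpw).1 z hz
    · exact (List.pairwise_cons.mp hpw).2

theorem pv_sorted2_eq_self (xs : List (Int × Int))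
    (h : xs.Pairwise (fun p q => p.1 < q.1)) :
    PySem.List.sorted2 xs Prod.fst Prod.snd = xs := by
  show xs.foldl _ [] = xs
  have := pv_sorted2_aux xs [] (by simp) h
  simpa using this

theorem pv_mergeLoop_props (s e : Int) :
    ∀ (rs : List (Int × Int)) (cur : Int × Int),
    (s ≤ cur.1 ∧ cur.1 < cur.2 ∧ cur.2 ≤ e) →
    (∀ r ∈ rs, s ≤ r.1 ∧ r.1 < r.2 ∧ r.2 ≤ e) →
    (∀ r ∈ rs, cur.1 ≤ r.1) →
    rs.Pairwise (fun p q => p.1 ≤ q.1) →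
    (∀ p ∈ pvMergeLoop cur rs, s ≤ p.1 ∧ p.1 < p.2 ∧ p.2 ≤ e) ∧
    (pvMergeLoop cur rs).Pairwise (fun p q => p.2 < q.1) ∧
    (∀ p ∈ pvMergeLoop cur rs, cur.1 ≤ p.1) ∧
    pvMergeLoop cur rs ≠ [] := by
  intro rs
  induction rs with
  | nil =>
    intro cur hc _ _ _
    refine ⟨?_, ?_, ?_, ?_⟩ <;> simp [pvMergeLoop]
    · exact hc
  | cons r rest ih =>
    intro cur hc hrs hord hpw
    obtain ⟨s2, e2⟩ := r
    have hr := hrs (s2, e2) (by simp)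
    have hpw' := List.pairwise_cons.mp hpw
    simp only [pvMergeLoop]
    by_cases hle : s2 ≤ cur.2
    · simp only [if_pos hle]
      have := ih (cur.1, max cur.2 e2)
        ⟨hc.1, by simp at hr ⊢; omega, by simp at hr ⊢; omega⟩
        (fun q hq => hrs q (by simp [hq]))
        (fun q hq => hord q (by simp [hq]))
        hpw'.2
      exact ⟨this.1, this.2.1, fun p hp => this.2.2.1 p hp, this.2.2.2⟩
    · simp only [if_neg hle]
      rw [not_le] at hle
      have hIH := ih (s2, e2) ⟨hr.1, hr.2.1, hr.2.2⟩
        (fun q hq => hrs q (by simp [hq]))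
        (fun q hq => by have := hpw'.1 q hq; simpa using this)
        hpw'.2
      refine ⟨?_, ?_, ?_, by simp⟩
      · intro p hp
        rcases List.mem_cons.mp hp with h | h
        · subst h; exact hc
        · exact hIH.1 p h
      · refine List.pairwise_cons.mpr ⟨?_, hIH.2.1⟩
        intro q hq
        have h1 : s2 ≤ q.1 := by have := hIH.2.2.1 q hq; simpa using this
        omega
      · intro p hp
        rcases List.mem_cons.mp hp with h | h
        · subst h; omega
        · have h1 : s2 ≤ p.1 := by have := hIH.2.2.1 p h; simpa using this
          have := hord (s2, e2) (by simp)
          simp at this; omega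

theorem pv_mergeLoop_sep_id :
    ∀ (t : List (Int × Int)) (x : Int × Int),
    (x :: t).Pairwise (fun p q => p.2 < q.1) →
    pvMergeLoop x t = x :: t := by
  intro t
  induction t with
  | nil => intro x _; rfl
  | cons r rest ih =>
    intro x hpw
    obtain ⟨s2, e2⟩ := r
    have h := (List.pairwise_cons.mp hpw).1 (s2, e2) (by simp)
    simp only [pvMergeLoop, if_neg (by simp at h ⊢; omega : ¬ s2 ≤ x.2)]
    rw [ih (s2, e2) (List.pairwise_cons.mp hpw).2]

theorem pv_subStep_acc (rs : List (Int × Int)) :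
    ∀ (o : List (Int × Int)) (c : Int),
    rs.foldl pvSubStep (o, c) =
      (o ++ (rs.foldl pvSubStep ([], c)).1, (rs.foldl pvSubStep ([], c)).2) := by
  induction rs with
  | nil => intro o c; simp
  | cons r rest ih =>
    intro o c
    simp only [List.foldl_cons, pvSubStep]
    rw [ih (if c < r.1 then o ++ [(c, r.1)] else o) (max c r.2),
        ih (if c < r.1 then [] ++ [(c, r.1)] else []) (max c r.2)]
    split_ifs <;> simp

theorem pv_mergeLoop_gaps :
    ∀ (rs : List (Int × Int)) (cur : Int × Int) (o : List (Int × Int)) (c : Int),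
    (cur :: rs).Pairwise (fun p q => p.1 ≤ q.1) →
    (pvMergeLoop cur rs).foldl pvSubStep (o, c) = (cur :: rs).foldl pvSubStep (o, c) := by
  intro rs
  induction rs with
  | nil => intro cur o c _; rfl
  | cons r rest ih =>
    intro cur o c hpw
    obtain ⟨s2, e2⟩ := r
    have hpw' := List.pairwise_cons.mp hpw
    have hpw'' := List.pairwise_cons.mp hpw'.2
    have hcur2 : cur.1 ≤ s2 := by have := hpw'.1 (s2, e2) (by simp); simpa using this
    simp only [pvMergeLoop]
    by_cases hle : s2 ≤ cur.2
    · simp only [if_pos hle]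
      rw [ih (cur.1, max cur.2 e2) o c (by
        refine List.pairwise_cons.mpr ⟨?_, hpw''.2⟩
        intro q hq
        have h1 := hpw'.1 q (by simp [hq])
        simpa using h1)]
      simp only [List.foldl_cons]
      have hstate : pvSubStep (o, c) (cur.1, max cur.2 e2)
          = pvSubStep (pvSubStep (o, c) cur) (s2, e2) := by
        simp only [pvSubStep]
        refine Prod.ext ?_ ?_
        · have hns : ¬ (max c cur.2 < s2) := by simp; omega
          simp only [if_neg hns]
        · simp
      rw [hstate]
    · simp only [if_neg hle, List.foldl_cons]
      exact ih (s2, e2) (pvSubStep (o, c) cur).1 (pvSubStep (o, c) cur).2 hpw'.2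

theorem pv_sweep_eq (k : Int) :
    ∀ (rs : List (Int × Int)) (t : List (Int × Int)) (c : Int),
    rs.foldl (pvSwStep k) (t, c) =
      (t ++ (rs.foldl pvSubStep ([], c)).1.filter (fun r => decide (r.2 - r.1 ≥ k)),
       (rs.foldl pvSubStep ([], c)).2) := by
  intro rs
  induction rs with
  | nil => intro t c; simp
  | cons r rest ih =>
    intro t c
    rw [List.foldl_cons, List.foldl_cons]
    have hsw : pvSwStep k (t, c) r
        = ((if c < r.1 ∧ r.1 - c ≥ k then t ++ [(c, r.1)] else t), max c r.2) := rfl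
    have hsb : pvSubStep ([], c) r = ((if c < r.1 then [(c, r.1)] else []), max c r.2) := by
      simp only [pvSubStep]
      split_ifs <;> simp
    rw [hsw, hsb, ih, pv_subStep_acc rest (if c < r.1 then [(c, r.1)] else []) (max c r.2)]
    refine Prod.ext ?_ rfl
    simp only [List.filter_append, ← List.append_assoc]
    congr 1
    by_cases hc : c < r.1
    · by_cases hk : r.1 - c ≥ k
      · rw [if_pos ⟨hc, hk⟩, if_pos hc]
        simp [hk]
      · rw [if_neg (by tauto), if_pos hc]
        simp [hk]
    · rw [if_neg (by tauto), if_neg hc]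
      simp

theorem pv_mergeIntervals_sep_id (M : List (Int × Int))
    (hlt : M.Pairwise (fun p q => p.1 < q.1))
    (hsep : M.Pairwise (fun p q => p.2 < q.1)) :
    pvMergeIntervals M = M := by
  cases M with
  | nil => rfl
  | cons m0 mt =>
    unfold pvMergeIntervals
    rw [pv_sorted2_eq_self _ hlt]
    exact pv_mergeLoop_sep_id mt m0 hsep

theorem pv_core (k : Int) (x : Int × Int) (R : List (Int × Int)) (acc : List (Int × Int))
    (hRpw : R.Pairwise (fun p q => p.1 < q.1))
    (hRmem : ∀ r ∈ R, x.1 ≤ r.1 ∧ r.1 < r.2 ∧ r.2 ≤ x.2)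
    (hx : x.1 < x.2) :
    (pvSubtract x (pvMergeIntervals R)).foldl
        (fun tr r => if r.2 - r.1 ≥ k then tr ++ [r] else tr) acc =
    (fun oc : List (Int × Int) × Int =>
        if oc.2 < x.2 ∧ x.2 - oc.2 ≥ k then oc.1 ++ [(oc.2, x.2)] else oc.1)
      (acc ++ (R.foldl pvSubStep ([], x.1)).1.filter (fun r => decide (r.2 - r.1 ≥ k)),
       (R.foldl pvSubStep ([], x.1)).2) := by
  cases R with
  | nil =>
    have hsub : pvSubtract x (pvMergeIntervals []) = [x] := rfl
    rw [hsub]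
    simp only [List.foldl_nil, List.foldl_cons, List.filter_nil, List.append_nil]
    have hxx : (x.1, x.2) = x := rfl
    by_cases hk : x.2 - x.1 ≥ k
    · rw [if_pos hk, if_pos ⟨hx, hk⟩, hxx]
    · rw [if_neg hk, if_neg (by tauto)]
  | cons r0 rest =>
    have hps := List.pairwise_cons.mp hRpw
    have hr0 := hRmem r0 (by simp)
    have hrest : ∀ r ∈ rest, x.1 ≤ r.1 ∧ r.1 < r.2 ∧ r.2 ≤ x.2 :=
      fun r hr => hRmem r (by simp [hr])
    have hord : ∀ r ∈ rest, r0.1 ≤ r.1 := fun r hr => le_of_lt (hps.1 r hr)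
    have hpwrest : rest.Pairwise (fun p q => p.1 ≤ q.1) := hps.2.imp le_of_lt
    have hMI : pvMergeIntervals (r0 :: rest) = pvMergeLoop r0 rest := by
      unfold pvMergeIntervals
      rw [pv_sorted2_eq_self _ hRpw]
    have props := pv_mergeLoop_props x.1 x.2 rest r0 ⟨hr0.1, hr0.2.1, hr0.2.2⟩ hrest hord hpwrest
    have hMpwlt : (pvMergeLoop r0 rest).Pairwise (fun p q => p.1 < q.1) := by
      have h1 := List.Pairwise.and_mem.mp props.2.1
      refine (List.Pairwise.imp ?_ h1)
      intro a b hab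
      have := (props.1 a hab.1).2.1
      omega
    have hclamp : ((pvMergeLoop r0 rest).filter
        (fun r => !(decide (r.2 ≤ x.1) || decide (r.1 ≥ x.2)))) = pvMergeLoop r0 rest :=
      List.filter_eq_self.mpr (fun r hr => by
        have := props.1 r hr
        simp only [Bool.not_eq_eq_eq_not, Bool.not_true, Bool.or_eq_false_iff,
          decide_eq_false_iff_not]
        omega)
    have hmap : (pvMergeLoop r0 rest).map (fun r => (max x.1 r.1, min x.2 r.2))
        = pvMergeLoop r0 rest := by
      rw [List.map_congr_left (g := id) (fun r hr => by
        have := props.1 r hr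
        refine Prod.ext ?_ ?_ <;> simp <;> omega)]
      exact List.map_id _
    have hfilt2 : ((pvMergeLoop r0 rest).filter (fun r => decide (r.1 < r.2)))
        = pvMergeLoop r0 rest :=
      List.filter_eq_self.mpr (fun r hr => by
        have := props.1 r hr
        simp only [decide_eq_true_eq]
        omega)
    have hMI2 : pvMergeIntervals (pvMergeLoop r0 rest) = pvMergeLoop r0 rest :=
      pv_mergeIntervals_sep_id _ hMpwlt props.2.1
    have hsub : pvSubtract x (pvMergeLoop r0 rest) =
        (fun oc : List (Int × Int) × Int =>
          if oc.2 < x.2 then oc.1 ++ [(oc.2, x.2)] else oc.1)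
        ((pvMergeLoop r0 rest).foldl pvSubStep ([], x.1)) := by
      unfold pvSubtract
      simp only [hclamp, hmap, hfilt2, hMI2, if_neg props.2.2.2]
      rfl
    rw [hMI, hsub, pv_mergeLoop_gaps rest r0 [] x.1
      (List.pairwise_cons.mpr ⟨hord, hpwrest⟩)]
    beta_reduce
    set G := ((r0 :: rest).foldl pvSubStep ([], x.1)).1 with hG
    set c := ((r0 :: rest).foldl pvSubStep ([], x.1)).2 with hc
    by_cases hlt : c < x.2
    · rw [if_pos hlt]
      rw [PySem.List.foldl_append_ite_eq_filter (fun r : Int × Int => r.2 - r.1 ≥ k)]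
      by_cases hk : x.2 - c ≥ k
      · rw [if_pos ⟨hlt, hk⟩]
        simp [List.filter_append, hk]
      · rw [if_neg (by tauto)]
        simp [List.filter_append, hk]
    · rw [if_neg hlt, if_neg (by tauto)]
      rw [PySem.List.foldl_append_ite_eq_filter (fun r : Int × Int => r.2 - r.1 ≥ k)]

theorem pv_step_eq (gold_words instr_words : List String) (k trim_k : Int)
    (acc : List (Int × Int)) (x : Int × Int) :
    (if trim_k ≤ 0 ∨ x.2 - x.1 < trim_k then
       if x.2 - x.1 ≥ k then acc ++ [x] else acc
     else
       (pvSubtract x (pvMergeIntervals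
         ((PySem.List.pyRange 0 (x.2 - x.1 - trim_k + 1) 1).foldl
           (fun a i =>
             if PySem.Set.contains (pvKset instr_words trim_k)
                 (PySem.List.slice gold_words (some (x.1 + i)) (some (x.1 + i + trim_k)))
             then a ++ [(x.1 + i, x.1 + i + trim_k)] else a) []))).foldl
         (fun tr r => if r.2 - r.1 ≥ k then tr ++ [r] else tr) acc) =
    (if trim_k ≤ 0 ∨ x.2 - x.1 < trim_k then
       if x.2 - x.1 ≥ k then acc ++ [x] else acc
     else
       (fun (oc : List (Int × Int) × Int) =>
         if oc.2 < x.2 ∧ x.2 - oc.2 ≥ k then oc.1 ++ [(oc.2, x.2)] else oc.1)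
       ((PySem.List.pyRange 0 (x.2 - x.1 - trim_k + 1) 1).foldl
         (fun (st : List (Int × Int) × Int) i =>
           if PySem.Set.contains (pvKset instr_words trim_k)
               (PySem.List.slice gold_words (some (x.1 + i)) (some (x.1 + i + trim_k)))
           then (if st.2 < x.1 + i ∧ x.1 + i - st.2 ≥ k then st.1 ++ [(st.2, x.1 + i)] else st.1,
                 max st.2 (x.1 + i + trim_k))
           else st) (acc, x.1))) := by
  by_cases hguard : trim_k ≤ 0 ∨ x.2 - x.1 < trim_k
  · rw [if_pos hguard, if_pos hguard]
  · rw [if_neg hguard, if_neg hguard]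
    have h0 : 0 < trim_k := by omega
    have h1 : trim_k ≤ x.2 - x.1 := by omega
    set bad : Int → Bool := fun i => PySem.Set.contains (pvKset instr_words trim_k)
      (PySem.List.slice gold_words (some (x.1 + i)) (some (x.1 + i + trim_k))) with hbad
    set n : Int := x.2 - x.1 - trim_k + 1 with hn
    set h : Int → Int × Int := fun i => (x.1 + i, x.1 + i + trim_k) with hh
    -- A's removes loop builds R; B's loop is the sweep over R
    rw [PySem.List.foldl_append_if bad h, List.nil_append]
    rw [PySem.List.foldl_if_eq_foldl_filter bad
      (fun (st : List (Int × Int) × Int) i =>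
        (if st.2 < x.1 + i ∧ x.1 + i - st.2 ≥ k then st.1 ++ [(st.2, x.1 + i)] else st.1,
         max st.2 (x.1 + i + trim_k)))]
    set R : List (Int × Int) := (((PySem.List.pyRange 0 n 1).filter bad).map h) with hR
    have hBfold : ((PySem.List.pyRange 0 n 1).filter bad).foldl
        (fun (st : List (Int × Int) × Int) i =>
          (if st.2 < x.1 + i ∧ x.1 + i - st.2 ≥ k then st.1 ++ [(st.2, x.1 + i)] else st.1,
           max st.2 (x.1 + i + trim_k))) (acc, x.1)
        = R.foldl (pvSwStep k) (acc, x.1) := by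
      rw [hR, List.foldl_map]
      rfl
    rw [hBfold, pv_sweep_eq k R acc x.1]
    have hRpw : R.Pairwise (fun p q => p.1 < q.1) := by
      rw [hR]
      refine List.pairwise_map.mpr ?_
      refine List.Pairwise.imp ?_ (List.Pairwise.filter bad (PySem.List.pairwise_lt_pyRange_one 0 n))
      intro a b hab
      simpa [hh] using by omega
    have hRmem : ∀ r ∈ R, x.1 ≤ r.1 ∧ r.1 < r.2 ∧ r.2 ≤ x.2 := by
      intro r hr
      rw [hR] at hr
      obtain ⟨i, hi, rfl⟩ := List.mem_map.mp hr
      have := (List.mem_filter.mp hi).1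
      have hi2 := PySem.List.mem_pyRange_one.mp this
      simp only [hh]
      omega
    have hx : x.1 < x.2 := by omega
    exact pv_core k x R acc hRpw hRmem hx

-- ===== VERDICT (by name: the statement is the Claim_ definition above) =====
theorem trim_instruction_py_spec : Claim_equal_trim_instruction_py := by
  intro gold_words instr_words intervals k trim_k _
  unfold Spec_trim_instruction_py trim_instruction_py trim_instruction_py_alt
  refine congrArg pvMergeIntervals ?_
  apply PySem.List.foldl_congr_mem
  intro acc x _
  exact pv_step_eq gold_words instr_words k trim_k acc x
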